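-- pv_equiv track=rewrite | github.com/jayasurya-n/Contests | CodeForces_Contest/Educational_CodeForces_Round_167/two_movies.py | maximumRating
-- ===== SOURCE A (Python) =====
-- def maximumRating(a,b,n):
--     ans = 0
--     a_rating,b_rating = 0,0
--     pos,neg = 0,0
--
--     for i in range(n):
--         if(a[i]>b[i]):a_rating+=a[i]
--         elif(a[i]<b[i]):b_rating+=b[i]
--         elif(a[i]==1):pos+=1
--         elif(a[i]==-1):neg+=1
--
--     while(pos):
--         if(a_rating>b_rating):b_rating+=1
--         else:a_rating+=1
--         pos-=1
--
--     while(neg):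
--         if(a_rating>b_rating):a_rating-=1
--         else:b_rating-=1
--         neg-=1
--
--     return min(a_rating,b_rating)
-- ===== SOURCE B (Python) =====
-- def _balance_lo_hi(lo, hi, pos):
--     # raise both toward each other: fill the gap, then split the remainder
--     if pos <= hi - lo:
--         return lo + pos, hi
--     r = pos - (hi - lo)
--     return hi + r // 2, hi + (r + 1) // 2
--
-- def maximumRating(a, b, n):
--     a_rating = sum(a[i] for i in range(n) if a[i] > b[i])
--     b_rating = sum(b[i] for i in range(n) if b[i] > a[i])
--     pos = sum(1 for i in range(n) if a[i] == b[i] == 1)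
--     neg = sum(1 for i in range(n) if a[i] == b[i] == -1)
--     lo, hi = _balance_lo_hi(min(a_rating, b_rating), max(a_rating, b_rating), pos)
--     if neg <= hi - lo:
--         return lo
--     r = neg - (hi - lo)
--     return lo - (r + 1) // 2
-- ===== Notes on version B (the rewrite author's own statement) =====
-- stated objective: alternative
-- what changed: B replaces A's two O(pos+neg) balancing while-loops with closed-form gap-fill-and-split arithmetic (floor/ceil of the remainder), and computes the four classification aggregates as comprehension sums instead of one four-way branching loop.
import Mathlib
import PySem

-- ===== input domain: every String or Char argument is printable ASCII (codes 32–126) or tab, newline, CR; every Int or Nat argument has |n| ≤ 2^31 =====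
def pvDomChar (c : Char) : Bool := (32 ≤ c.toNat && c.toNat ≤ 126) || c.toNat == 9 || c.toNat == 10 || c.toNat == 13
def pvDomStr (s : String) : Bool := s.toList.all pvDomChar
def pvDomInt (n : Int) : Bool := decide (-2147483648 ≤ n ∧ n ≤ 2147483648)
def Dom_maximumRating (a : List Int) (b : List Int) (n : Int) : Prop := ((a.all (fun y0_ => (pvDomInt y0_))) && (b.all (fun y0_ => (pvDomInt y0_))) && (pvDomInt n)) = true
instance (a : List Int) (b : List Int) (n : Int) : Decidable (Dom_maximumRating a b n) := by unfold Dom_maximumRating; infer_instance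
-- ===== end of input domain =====

-- B replaces A's two O(pos+neg) balancing while-loops by closed-form gap-fill-and-split arithmetic (alternative decomposition).

-- ===== PORT A =====
-- one step of A's classification loop; indexing a[i]/b[i] is PySem.List.pyGetD (exact under Pre_: every i in range(n) is in range)
def maxStep (a b : List Int) (st : Int × Int × Int × Int) (i : Int) : Int × Int × Int × Int :=
  if PySem.List.pyGetD a i 0 > PySem.List.pyGetD b i 0 then (st.1 + PySem.List.pyGetD a i 0, st.2.1, st.2.2.1, st.2.2.2)
  else if PySem.List.pyGetD a i 0 < PySem.List.pyGetD b i 0 then (st.1, st.2.1 + PySem.List.pyGetD b i 0, st.2.2.1, st.2.2.2)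
  else if PySem.List.pyGetD a i 0 = 1 then (st.1, st.2.1, st.2.2.1 + 1, st.2.2.2)
  else if PySem.List.pyGetD a i 0 = -1 then (st.1, st.2.1, st.2.2.1, st.2.2.2 + 1)
  else st

-- A's 'while(pos)' loop: pos is a count (≥ 0), so the loop runs exactly pos.toNat times
def posLoop : Nat → Int → Int → Int × Int
  | 0, x, y => (x, y)
  | Nat.succ k, x, y => if x > y then posLoop k x (y + 1) else posLoop k (x + 1) y

-- A's 'while(neg)' loop
def negLoop : Nat → Int → Int → Int × Int
  | 0, x, y => (x, y)
  | Nat.succ k, x, y => if x > y then negLoop k (x - 1) y else negLoop k x (y - 1)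

def maximumRating (a : List Int) (b : List Int) (n : Int) : Int :=
  let s := (PySem.List.pyRange 0 n 1).foldl (maxStep a b) (0, 0, 0, 0)
  let p := posLoop s.2.2.1.toNat s.1 s.2.1
  let q := negLoop s.2.2.2.toNat p.1 p.2
  min q.1 q.2

-- ===== PORT B =====
-- sum(a[i] for i in range(n) if a[i] > b[i])
def arSum (a b : List Int) (idx : List Int) : Int :=
  ((idx.filter (fun i => decide (PySem.List.pyGetD a i 0 > PySem.List.pyGetD b i 0))).map (fun i => PySem.List.pyGetD a i 0)).sum

-- sum(b[i] for i in range(n) if b[i] > a[i])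
def brSum (a b : List Int) (idx : List Int) : Int :=
  ((idx.filter (fun i => decide (PySem.List.pyGetD b i 0 > PySem.List.pyGetD a i 0))).map (fun i => PySem.List.pyGetD b i 0)).sum

-- sum(1 for i in range(n) if a[i] == b[i] == v)
def eqCount (a b : List Int) (v : Int) (idx : List Int) : Int :=
  ((idx.filter (fun i => decide (PySem.List.pyGetD a i 0 = PySem.List.pyGetD b i 0 ∧ PySem.List.pyGetD a i 0 = v))).map (fun _ => (1 : Int))).sum

-- _balance_lo_hi: fill the gap, then split the remainder (// is PySem.Int.floordiv)
def balanceLoHi (lo hi pos : Int) : Int × Int :=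
  if pos ≤ hi - lo then (lo + pos, hi)
  else (hi + PySem.Int.floordiv (pos - (hi - lo)) 2, hi + PySem.Int.floordiv (pos - (hi - lo) + 1) 2)

def maximumRating_alt (a : List Int) (b : List Int) (n : Int) : Int :=
  let idx := PySem.List.pyRange 0 n 1
  let ar := arSum a b idx
  let br := brSum a b idx
  let pos := eqCount a b 1 idx
  let neg := eqCount a b (-1) idx
  let lh := balanceLoHi (min ar br) (max ar br) pos
  if neg ≤ lh.2 - lh.1 then lh.1
  else lh.1 - PySem.Int.floordiv (neg - (lh.2 - lh.1) + 1) 2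

-- ===== PRECONDITION & SPEC =====
-- A indexes a[i], b[i] for every i in range(n): Pre_ excludes exactly the inputs where that raises IndexError
def Pre_maximumRating (a : List Int) (b : List Int) (n : Int) : Prop :=
  n ≤ (a.length : Int) ∧ n ≤ (b.length : Int)
instance (a : List Int) (b : List Int) (n : Int) : Decidable (Pre_maximumRating a b n) := by unfold Pre_maximumRating; infer_instance

def pvWitness_maximumRating : List Int × List Int × Int := ([1, -1], [1, 2], 2)

def Spec_maximumRating (a : List Int) (b : List Int) (n : Int) (out : Int) : Prop := out = maximumRating_alt a b n
instance (a : List Int) (b : List Int) (n : Int) (out : Int) : Decidable (Spec_maximumRating a b n out) := by unfold Spec_maximumRating; infer_instance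

-- ===== CLAIM (what is proved, stated in full; the proofs are below) =====
def Claim_equal_maximumRating : Prop := ∀ (a : List Int) (b : List Int) (n : Int), Dom_maximumRating a b n → Pre_maximumRating a b n → Spec_maximumRating a b n (maximumRating a b n)

-- ===== LEMMAS AND PROOFS =====

-- A's single classification pass computes exactly B's four comprehension sums
lemma scan_eq (a b : List Int) (l : List Int) : ∀ (w x y z : Int),
    l.foldl (maxStep a b) (w, x, y, z) =
      (w + arSum a b l, x + brSum a b l, y + eqCount a b 1 l, z + eqCount a b (-1) l) := by
  induction l with
  | nil => intro w x y z; simp [arSum, brSum, eqCount]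
  | cons i t ih =>
    intro w x y z
    simp only [List.foldl_cons, maxStep]
    rw [ih]
    simp only [arSum, brSum, eqCount, List.filter_cons, Prod.mk.injEq]
    split_ifs <;>
      refine ⟨?_, ?_, ?_, ?_⟩ <;>
      simp only [decide_eq_true_eq, List.map_cons, List.sum_cons] at * <;> omega

lemma eqCount_nonneg (a b : List Int) (v : Int) (l : List Int) : 0 ≤ eqCount a b v l := by
  induction l with
  | nil => simp [eqCount]
  | cons i t ih =>
    simp only [eqCount, List.filter_cons] at ih ⊢
    split_ifs
    · simp only [List.map_cons, List.sum_cons]; omega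
    · exact ih

lemma posLoop_minmax : ∀ (k : Nat) (x y : Int),
    min (posLoop k x y).1 (posLoop k x y).2 =
      (if (k : Int) ≤ max x y - min x y then min x y + k else max x y + ((k : Int) - (max x y - min x y)) / 2) ∧
    max (posLoop k x y).1 (posLoop k x y).2 =
      (if (k : Int) ≤ max x y - min x y then max x y else max x y + ((k : Int) - (max x y - min x y) + 1) / 2) := by
  intro k
  induction k with
  | zero => intro x y; simp only [posLoop, Nat.cast_zero]; constructor <;> split_ifs <;> omega
  | succ k ih =>
    intro x y
    by_cases h : x > y
    · rw [show posLoop (k + 1) x y = posLoop k x (y + 1) from by simp [posLoop, h]]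
      rcases ih x (y + 1) with ⟨h1, h2⟩
      rw [h1, h2]; push_cast
      constructor <;> split_ifs <;> omega
    · rw [show posLoop (k + 1) x y = posLoop k (x + 1) y from by simp [posLoop, h]]
      rcases ih (x + 1) y with ⟨h1, h2⟩
      rw [h1, h2]; push_cast
      constructor <;> split_ifs <;> omega

lemma negLoop_minmax : ∀ (k : Nat) (x y : Int),
    min (negLoop k x y).1 (negLoop k x y).2 =
      (if (k : Int) ≤ max x y - min x y then min x y else min x y - ((k : Int) - (max x y - min x y) + 1) / 2) ∧
    max (negLoop k x y).1 (negLoop k x y).2 =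
      (if (k : Int) ≤ max x y - min x y then max x y - k else min x y - ((k : Int) - (max x y - min x y)) / 2) := by
  intro k
  induction k with
  | zero => intro x y; simp only [negLoop, Nat.cast_zero]; constructor <;> split_ifs <;> omega
  | succ k ih =>
    intro x y
    by_cases h : x > y
    · rw [show negLoop (k + 1) x y = negLoop k (x - 1) y from by simp [negLoop, h]]
      rcases ih (x - 1) y with ⟨h1, h2⟩
      rw [h1, h2]; push_cast
      constructor <;> split_ifs <;> omega
    · rw [show negLoop (k + 1) x y = negLoop k x (y - 1) from by simp [negLoop, h]]
      rcases ih x (y - 1) with ⟨h1, h2⟩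
      rw [h1, h2]; push_cast
      constructor <;> split_ifs <;> omega

-- closed-form balancing equals A's two loops, for any nonnegative counts
lemma balance_key (AR BR P N : Int) (hP : 0 ≤ P) (hN : 0 ≤ N) :
    min (negLoop N.toNat (posLoop P.toNat AR BR).1 (posLoop P.toNat AR BR).2).1
        (negLoop N.toNat (posLoop P.toNat AR BR).1 (posLoop P.toNat AR BR).2).2 =
      (if N ≤ (balanceLoHi (min AR BR) (max AR BR) P).2 - (balanceLoHi (min AR BR) (max AR BR) P).1
       then (balanceLoHi (min AR BR) (max AR BR) P).1
       else (balanceLoHi (min AR BR) (max AR BR) P).1 -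
            PySem.Int.floordiv (N - ((balanceLoHi (min AR BR) (max AR BR) P).2 - (balanceLoHi (min AR BR) (max AR BR) P).1) + 1) 2) := by
  rcases posLoop_minmax P.toNat AR BR with ⟨h1, h2⟩
  rw [Int.toNat_of_nonneg hP] at h1 h2
  rcases negLoop_minmax N.toNat (posLoop P.toNat AR BR).1 (posLoop P.toNat AR BR).2 with ⟨h3, (_h4 : _)⟩
  rw [Int.toNat_of_nonneg hN, h1, h2] at h3
  rw [h3]
  simp only [balanceLoHi,
    show ∀ a : Int, PySem.Int.floordiv a 2 = a / 2 from fun a => PySem.Int.floordiv_eq_ediv_of_pos (by norm_num)]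
  split_ifs <;> omega

-- ===== VERDICT (by name: the statement is the Claim_ definition above) =====
theorem maximumRating_spec : Claim_equal_maximumRating := by
  intro a b n _ _
  unfold Spec_maximumRating maximumRating maximumRating_alt
  simp only
  rw [scan_eq a b (PySem.List.pyRange 0 n 1) 0 0 0 0]
  simp only [zero_add]
  exact balance_key _ _ _ _
    (eqCount_nonneg a b 1 (PySem.List.pyRange 0 n 1))
    (eqCount_nonneg a b (-1) (PySem.List.pyRange 0 n 1))
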